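-- pv_equiv track=rewrite | github.com/icedmoca/MeRNSTA | storage/recursive_self_inspection.py | _are_contradictory_predicates
-- ===== SOURCE A (Python) =====
-- def _are_contradictory_predicates(pred1: str, pred2: str) -> bool:
--     """Check if two predicates are contradictory."""
--     contradictory_pairs = [
--         ('like', 'hate'), ('like', 'dislike'),
--         ('love', 'hate'), ('love', 'dislike'),
--         ('enjoy', 'hate'), ('enjoy', 'dislike'),
--         ('want', 'reject'), ('prefer', 'dislike')
--     ]
--
--     pred1_clean = pred1.lower().strip()
--     pred2_clean = pred2.lower().strip()
--
--     for pair in contradictory_pairs: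
--         if (pred1_clean in pair and pred2_clean in pair and pred1_clean != pred2_clean):
--             return True
--
--     return False
-- ===== SOURCE B (Python) =====
-- _POSITIVE = {'like', 'love', 'enjoy'}
-- _NEGATIVE = {'hate', 'dislike'}
-- _SPECIAL = {('want', 'reject'), ('prefer', 'dislike')}
--
--
-- def _are_contradictory_predicates(pred1: str, pred2: str) -> bool:
--     """Check if two predicates are contradictory."""
--     a = pred1.lower().strip()
--     b = pred2.lower().strip()
--
--     def opposed(x, y):
--         return (x in _POSITIVE and y in _NEGATIVE) or (x, y) in _SPECIAL
--
--     return opposed(a, b) or opposed(b, a)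
-- ===== Notes on version B (the rewrite author's own statement) =====
-- stated objective: alternative
-- what changed: Instead of scanning the 8-pair table, B factorizes it into a positive-class x negative-class cross product ({like,love,enjoy} x {hate,dislike}) plus two special pairs, and tests a directed 'opposed' relation in both orders; class disjointness replaces the explicit inequality guard.
import Mathlib
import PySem

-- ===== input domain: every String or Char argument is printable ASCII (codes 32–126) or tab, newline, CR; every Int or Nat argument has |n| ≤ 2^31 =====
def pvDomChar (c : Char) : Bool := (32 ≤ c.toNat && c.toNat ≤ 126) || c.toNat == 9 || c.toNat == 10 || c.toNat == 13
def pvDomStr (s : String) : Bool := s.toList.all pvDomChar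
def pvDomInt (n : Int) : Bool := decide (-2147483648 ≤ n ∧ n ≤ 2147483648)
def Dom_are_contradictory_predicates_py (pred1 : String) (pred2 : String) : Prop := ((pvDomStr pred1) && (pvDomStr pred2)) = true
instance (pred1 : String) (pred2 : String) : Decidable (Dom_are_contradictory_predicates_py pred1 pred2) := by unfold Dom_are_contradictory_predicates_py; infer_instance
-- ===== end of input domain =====

-- B replaces A's scan of an 8-pair table by the table's factorization: a positive-class × negative-class
-- cross product plus two special pairs, tested through a directed 'opposed' helper in both orders (alternative).

-- ===== PORT A =====
-- literal transliteration of A: build the pair list, clean both predicates, scan the pairs,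
-- returning True on the first pair containing both cleaned predicates with the two unequal.
def are_contradictory_predicates_py (pred1 : String) (pred2 : String) : Bool :=
  let contradictory_pairs : List (String × String) :=
    [("like", "hate"), ("like", "dislike"),
     ("love", "hate"), ("love", "dislike"),
     ("enjoy", "hate"), ("enjoy", "dislike"),
     ("want", "reject"), ("prefer", "dislike")]
  let pred1_clean := PySem.Str.strip (PySem.Str.lower pred1)
  let pred2_clean := PySem.Str.strip (PySem.Str.lower pred2)
  -- 'x in pair' on a 2-tuple is x == pair[0] or x == pair[1]; the early-return loop is List.any
  contradictory_pairs.any (fun pair =>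
    (pred1_clean == pair.1 || pred1_clean == pair.2) &&
    ((pred2_clean == pair.1 || pred2_clean == pair.2) &&
     !(pred1_clean == pred2_clean)))

-- ===== PORT B =====
-- module-level class sets and the two special pairs (Python sets → PySem.Set)
def pvPositive : PySem.Set String := PySem.Set.ofList ["like", "love", "enjoy"]
def pvNegative : PySem.Set String := PySem.Set.ofList ["hate", "dislike"]
def pvSpecial : PySem.Set (String × String) := PySem.Set.ofList [("want", "reject"), ("prefer", "dislike")]

-- the nested helper 'opposed(x, y)'
def pvOpposed (x y : String) : Bool :=
  (PySem.Set.contains pvPositive x && PySem.Set.contains pvNegative y) || PySem.Set.contains pvSpecial (x, y)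

def are_contradictory_predicates_py_alt (pred1 : String) (pred2 : String) : Bool :=
  let a := PySem.Str.strip (PySem.Str.lower pred1)
  let b := PySem.Str.strip (PySem.Str.lower pred2)
  pvOpposed a b || pvOpposed b a

-- ===== PRECONDITION & SPEC =====
def Spec_are_contradictory_predicates_py (pred1 : String) (pred2 : String) (out : Bool) : Prop := out = are_contradictory_predicates_py_alt pred1 pred2
instance (pred1 : String) (pred2 : String) (out : Bool) : Decidable (Spec_are_contradictory_predicates_py pred1 pred2 out) := by unfold Spec_are_contradictory_predicates_py; infer_instance

-- ===== CLAIM (what is proved, stated in full; the proofs are below) =====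
def Claim_equal_are_contradictory_predicates_py : Prop := ∀ (pred1 : String) (pred2 : String), Dom_are_contradictory_predicates_py pred1 pred2 → Spec_are_contradictory_predicates_py pred1 pred2 (are_contradictory_predicates_py pred1 pred2)

-- ===== LEMMAS AND PROOFS =====

-- every string is one of the 8 table words or none of them
theorem pv_word_cases (s : String) :
    s = "like" ∨ s = "love" ∨ s = "enjoy" ∨ s = "hate" ∨ s = "dislike" ∨
    s = "want" ∨ s = "reject" ∨ s = "prefer" ∨
    (s ≠ "like" ∧ s ≠ "love" ∧ s ≠ "enjoy" ∧ s ≠ "hate" ∧ s ≠ "dislike" ∧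
     s ≠ "want" ∧ s ≠ "reject" ∧ s ≠ "prefer") := by
  tauto

-- the two sides agree on arbitrary cleaned strings
theorem pv_core (a b : String) :
    ([("like", "hate"), ("like", "dislike"),
      ("love", "hate"), ("love", "dislike"),
      ("enjoy", "hate"), ("enjoy", "dislike"),
      ("want", "reject"), ("prefer", "dislike")].any (fun pair =>
        (a == pair.1 || a == pair.2) &&
        ((b == pair.1 || b == pair.2) && !(a == b))))
      = (pvOpposed a b || pvOpposed b a) := by
  rcases pv_word_cases a with rfl|rfl|rfl|rfl|rfl|rfl|rfl|rfl|⟨h1,h2,h3,h4,h5,h6,h7,h8⟩ <;>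
    rcases pv_word_cases b with rfl|rfl|rfl|rfl|rfl|rfl|rfl|rfl|⟨g1,g2,g3,g4,g5,g6,g7,g8⟩ <;>
    simp_all [pvOpposed, pvPositive, pvNegative, pvSpecial, PySem.Set.contains, PySem.Set.ofList]

-- ===== VERDICT (by name: the statement is the Claim_ definition above) =====
theorem are_contradictory_predicates_py_spec : Claim_equal_are_contradictory_predicates_py := by
  intro pred1 pred2 _
  unfold Spec_are_contradictory_predicates_py are_contradictory_predicates_py
    are_contradictory_predicates_py_alt
  exact pv_core _ _
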